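-- pv_equiv track=rewrite | github.com/lhlRahman/kactl-Python | numerical/ntt.py | conv
-- ===== SOURCE A (Python) =====
-- from typing import List
--
-- MOD = 998244353
--
-- ROOT = 62
--
-- def modpow(base: int, exp: int, mod: int) -> int:
--     """Modular exponentiation"""
--     result = 1
--     base %= mod
--     while exp > 0:
--         if exp & 1:
--             result = (result * base) % mod
--         base = (base * base) % mod
--         exp >>= 1
--     return result
--
-- def ntt(a: List[int], inv: bool = False) -> List[int]:
--     """Number Theoretic Transform in-place"""
--     n = len(a)
--     if n <= 1:
--         return a
--
--     L = n.bit_length() - 1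
--
--     # Precompute roots
--     rt = [0] * n
--     rt[0] = 1
--     k = 1
--     s = 1
--     while k < n:
--         if k == 1:
--             z = modpow(ROOT, MOD >> (s + 1), MOD)
--         else:
--             z = rt[k // 2] if k & 1 == 0 else (rt[k // 2] * modpow(ROOT, MOD >> (s + 1), MOD)) % MOD
--         rt[k] = z if k % 2 == 0 else (rt[k // 2] * modpow(ROOT, MOD >> (s + 1), MOD)) % MOD
--         k += 1
--         if k & (k - 1) == 0:
--             s += 1
--
--     # Bit-reverse permutation
--     rev = [0] * n
--     for i in range(n):
--         rev[i] = (rev[i // 2] | (i & 1) << L) // 2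
--     for i in range(n):
--         if i < rev[i]:
--             a[i], a[rev[i]] = a[rev[i]], a[i]
--
--     # NTT computation
--     k = 1
--     while k < n:
--         for i in range(0, n, 2 * k):
--             for j in range(k):
--                 z = rt[j + k] * a[i + j + k] % MOD
--                 a[i + j + k] = (a[i + j] - z + MOD) % MOD
--                 a[i + j] = (a[i + j] + z) % MOD
--         k *= 2
--
--     if inv:
--         inv_n = modpow(n, MOD - 2, MOD)
--         for i in range(n):
--             a[i] = a[i] * inv_n % MOD
--         a.reverse()
--         a[0], a[n - 1] = a[n - 1], a[0]
--
--     return a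
--
-- def conv(a: List[int], b: List[int]) -> List[int]:
--     """Convolution modulo 998244353"""
--     if not a or not b:
--         return []
--
--     s = len(a) + len(b) - 1
--     n = 1 << (s - 1).bit_length()
--
--     L = a[:] + [0] * (n - len(a))
--     R = b[:] + [0] * (n - len(b))
--
--     ntt(L)
--     ntt(R)
--
--     out = [(L[i] * R[i]) % MOD for i in range(n)]
--     ntt(out, inv=True)
--
--     return out[:s]
-- ===== SOURCE B (Python) =====
-- MOD = 998244353
--
-- ROOT = 62
--
--
-- def conv(a, b):
--     """Same values as A, computed by a recursive divide-and-conquer transform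
--     over fresh lists instead of A's iterative in-place bit-reversal NTT."""
--     if not a or not b:
--         return []
--     s = len(a) + len(b) - 1
--     n = 1 << (s - 1).bit_length()
--
--     # twiddle table: rt[k] from rt[k >> 1] directly, exponent from k.bit_length()
--     rt = [1] * n
--     for k in range(1, n):
--         if k % 2 == 0:
--             rt[k] = rt[k >> 1]
--         else:
--             rt[k] = rt[k >> 1] * pow(ROOT, MOD >> (k.bit_length() + 1), MOD) % MOD
--
--     def rec(v):
--         if len(v) <= 1:
--             return v
--         h = len(v) // 2
--         e = rec(v[0::2])
--         o = rec(v[1::2])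
--         z = [rt[h + j] * o[j] % MOD for j in range(h)]
--         return [(e[j] + z[j]) % MOD for j in range(h)] + \
--                [(e[j] - z[j] + MOD) % MOD for j in range(h)]
--
--     L = rec(a + [0] * (n - len(a)))
--     R = rec(b + [0] * (n - len(b)))
--     out = rec([L[i] * R[i] % MOD for i in range(n)])
--     if n > 1:
--         inv_n = pow(n, MOD - 2, MOD)
--         out = [x * inv_n % MOD for x in out]
--         out = [out[0]] + out[1:-1][::-1] + [out[-1]]
--     return out[:s]
-- ===== Notes on version B (the rewrite author's own statement) =====
-- stated objective: alternative
-- what changed: The iterative in-place NTT pipeline (bit-reverse permutation via a rev array with swaps, in-place butterfly stages, hand-written modpow, stateful root-table loop) is replaced by a recursive divide-and-conquer transform that rebuilds fresh lists (even/odd split and combine), a direct root-table recurrence indexed by bit_length with builtin pow, and slice-based inverse post-processing; note A's transform is not the standard mod-998244353 NTT (its root table is off by one power), and B reproduces A's exact values.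
import Mathlib
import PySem

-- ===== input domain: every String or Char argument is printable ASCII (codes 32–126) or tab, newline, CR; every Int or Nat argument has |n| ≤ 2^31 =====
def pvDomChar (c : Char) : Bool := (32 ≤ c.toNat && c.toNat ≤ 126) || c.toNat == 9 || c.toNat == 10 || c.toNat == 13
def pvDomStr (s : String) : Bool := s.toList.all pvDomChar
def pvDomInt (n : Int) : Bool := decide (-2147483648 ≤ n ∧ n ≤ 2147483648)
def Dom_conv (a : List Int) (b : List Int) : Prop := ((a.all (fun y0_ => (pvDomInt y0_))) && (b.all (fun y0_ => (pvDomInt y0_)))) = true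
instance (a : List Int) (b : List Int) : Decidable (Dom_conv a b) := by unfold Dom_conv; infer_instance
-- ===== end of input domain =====

-- B replaces A's iterative in-place NTT pipeline (rev-array bit-reversal with swaps,
-- in-place butterfly stages, hand-written modpow, stateful root loop) by a recursive
-- divide-and-conquer transform over fresh lists; same return values (return-value
-- equivalence only; A's helper `ntt` mutates its list argument, but `conv` only ever
-- passes it fresh lists, so `conv` itself has no caller-visible side effects).

-- shared port of Python's int.bit_length() on nonnegative ints (both sources call it)
def bl (n : Nat) : Nat :=
  if n = 0 then 0 else bl (n / 2) + 1
termination_by n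
decreasing_by omega

-- ===== PORT A =====

-- `result/base/exp` loop of modpow; Python `%` with the positive modulus 998244353 is
-- Lean's `Int.emod`, exact here; exponents at every call site are nonnegative (Nat)
def modpowGo (result : Int) (base : Int) (exp : Nat) (md : Int) : Int :=
  if exp = 0 then result
  else modpowGo (if exp % 2 = 1 then result * base % md else result) (base * base % md) (exp / 2) md
termination_by exp
decreasing_by omega

def modpow (base : Int) (exp : Nat) (md : Int) : Int :=
  modpowGo 1 (base % md) exp md

-- the root-precompute `while k < n` loop, state (rt, k, s)
def rtLoopA (rt : List Int) (k s n : Nat) : List Int :=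
  if k < n then
    let z : Int :=
      if k = 1 then modpow 62 (998244353 >>> (s + 1)) 998244353
      else if k % 2 = 0 then rt.getD (k / 2) 0
      else rt.getD (k / 2) 0 * modpow 62 (998244353 >>> (s + 1)) 998244353 % 998244353
    let rt' := rt.set k
      (if k % 2 = 0 then z
       else rt.getD (k / 2) 0 * modpow 62 (998244353 >>> (s + 1)) 998244353 % 998244353)
    rtLoopA rt' (k + 1) (if (k + 1) &&& k = 0 then s + 1 else s) n
  else rt
termination_by n - k
decreasing_by omega

-- `for i in range(n): rev[i] = (rev[i//2] | (i & 1) << L) // 2`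
def revLoopA (L n : Nat) : List Nat :=
  (List.range n).foldl
    (fun rev i => rev.set i ((rev.getD (i / 2) 0 ||| ((i &&& 1) <<< L)) / 2))
    (List.replicate n 0)

-- `for i in range(n): if i < rev[i]: a[i], a[rev[i]] = a[rev[i]], a[i]`
def swapLoopA (rev : List Nat) (a : List Int) (n : Nat) : List Int :=
  (List.range n).foldl
    (fun a i =>
      let r := rev.getD i 0
      if i < r then
        let x := a.getD i 0
        let y := a.getD r 0
        (a.set i y).set r x
      else a) a

-- `range(0, n, step)` for the butterfly blocks (at every use, step ∣ n and 0 < step)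
def rangeStep (n step : Nat) : List Nat :=
  (List.range (n / step)).map (· * step)

-- the `while k < n` butterfly loop (in-place double loop)
def butterflyA (rt : List Int) (a : List Int) (k n : Nat) : List Int :=
  if 0 < k ∧ k < n then
    let a' := (rangeStep n (2 * k)).foldl
      (fun a i =>
        (List.range k).foldl
          (fun a j =>
            let z := rt.getD (j + k) 0 * a.getD (i + j + k) 0 % 998244353
            let a := a.set (i + j + k) ((a.getD (i + j) 0 - z + 998244353) % 998244353)
            a.set (i + j) ((a.getD (i + j) 0 + z) % 998244353)) a) a
    butterflyA rt a' (2 * k) n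
  else a
termination_by n - k
decreasing_by omega

def nttA (a : List Int) (inv : Bool) : List Int :=
  let n := a.length
  if n ≤ 1 then a
  else
    let L := bl n - 1
    let rt := rtLoopA ((List.replicate n (0 : Int)).set 0 1) 1 1 n
    let rev := revLoopA L n
    let a := swapLoopA rev a n
    let a := butterflyA rt a 1 n
    if inv then
      let invn := modpow (n : Int) (998244353 - 2) 998244353
      let a := a.map (fun x => x * invn % 998244353)   -- `for i in range(n): a[i] = a[i]*inv_n % MOD`
      let a := a.reverse
      let x := a.getD 0 0
      let y := a.getD (n - 1) 0
      (a.set 0 y).set (n - 1) x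
    else a

def conv (a : List Int) (b : List Int) : List Int :=
  if a.isEmpty || b.isEmpty then []
  else
    let s := a.length + b.length - 1
    let n := 1 <<< bl (s - 1)
    let Lp := a ++ List.replicate (n - a.length) (0 : Int)
    let Rp := b ++ List.replicate (n - b.length) (0 : Int)
    let Lt := nttA Lp false
    let Rt := nttA Rp false
    let out := (List.range n).map (fun i => Lt.getD i 0 * Rt.getD i 0 % 998244353)
    let out := nttA out true
    out.take s

-- ===== PORT B =====

-- port of the builtin three-argument pow(b, e, 998244353) Source B calls (top-down squaring)
def powModGo (b : Int) (e : Nat) : Int :=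
  if e = 0 then 1
  else
    let h := powModGo b (e / 2)
    if e % 2 = 0 then h * h % 998244353 else h * h % 998244353 * b % 998244353
termination_by e
decreasing_by omega

def powMod (b : Int) (e : Nat) : Int :=
  powModGo (b % 998244353) e

-- `rt = [1]*n; for k in range(1, n): rt[k] = ...` (direct recurrence on k)
def rtTableB (n : Nat) : List Int :=
  (List.range' 1 (n - 1)).foldl
    (fun rt k =>
      rt.set k
        (if k % 2 = 0 then rt.getD (k / 2) 0
         else rt.getD (k / 2) 0 * powMod 62 (998244353 >>> (bl k + 1)) % 998244353))
    (List.replicate n 1)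

-- v[0::2]
def evensB : List Int → List Int
  | [] => []
  | [x] => [x]
  | x :: _ :: r => x :: evensB r

theorem evensB_length (v : List Int) : (evensB v).length = (v.length + 1) / 2 := by
  fun_induction evensB v <;> simp [evensB, *] <;> omega

-- v[1::2] = (drop the head, then every second element)
def oddsB (v : List Int) : List Int := evensB (v.drop 1)

theorem oddsB_length (v : List Int) : (oddsB v).length = v.length / 2 := by
  unfold oddsB; rw [evensB_length]; simp; omega

-- the recursive transform `rec`
def nttRecB (rt : List Int) (v : List Int) : List Int :=
  if v.length ≤ 1 then v
  else
    let h := v.length / 2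
    let e := nttRecB rt (evensB v)
    let o := nttRecB rt (oddsB v)
    let z := (List.range h).map (fun j => rt.getD (h + j) 0 * o.getD j 0 % 998244353)
    ((List.range h).map fun j => (e.getD j 0 + z.getD j 0) % 998244353) ++
    ((List.range h).map fun j => (e.getD j 0 - z.getD j 0 + 998244353) % 998244353)
termination_by v.length
decreasing_by
  · rw [evensB_length]; omega
  · rw [oddsB_length]; omega

def conv_alt (a : List Int) (b : List Int) : List Int :=
  if a.isEmpty || b.isEmpty then []
  else
    let s := a.length + b.length - 1
    let n := 1 <<< bl (s - 1)
    let rt := rtTableB n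
    let Lt := nttRecB rt (a ++ List.replicate (n - a.length) (0 : Int))
    let Rt := nttRecB rt (b ++ List.replicate (n - b.length) (0 : Int))
    let out := nttRecB rt ((List.range n).map fun i => Lt.getD i 0 * Rt.getD i 0 % 998244353)
    if 1 < n then
      let invn := powMod (n : Int) (998244353 - 2)
      let out := out.map (fun x => x * invn % 998244353)
      -- `[out[0]] + out[1:-1][::-1] + [out[-1]]`
      let out := [out.getD 0 0] ++ ((out.drop 1).dropLast).reverse ++ [out.getD (n - 1) 0]
      out.take s
    else out.take s

-- ===== PRECONDITION & SPEC =====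
def Spec_conv (a : List Int) (b : List Int) (out : List Int) : Prop := out = conv_alt a b
instance (a : List Int) (b : List Int) (out : List Int) : Decidable (Spec_conv a b out) := by unfold Spec_conv; infer_instance

-- ===== CLAIM (what is proved, stated in full; the proofs are below) =====
def Claim_equal_conv : Prop := ∀ (a : List Int) (b : List Int), Dom_conv a b → Spec_conv a b (conv a b)

-- ===== LEMMAS AND PROOFS =====


-- ===== generic list lemmas =====

theorem getD_set (l : List Int) (m q : Nat) (v d : Int) :
    (l.set m v).getD q d = if m = q ∧ m < l.length then v else l.getD q d := by
  rw [List.getD_eq_getElem?_getD, List.getD_eq_getElem?_getD, List.getElem?_set]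
  split
  · rename_i h; subst h
    by_cases hm : m < l.length <;> simp [hm]
  · rename_i h; simp [h]

theorem getD_set_nat (l : List Nat) (m q : Nat) (v d : Nat) :
    (l.set m v).getD q d = if m = q ∧ m < l.length then v else l.getD q d := by
  rw [List.getD_eq_getElem?_getD, List.getD_eq_getElem?_getD, List.getElem?_set]
  split
  · rename_i h; subst h
    by_cases hm : m < l.length <;> simp [hm]
  · rename_i h; simp [h]

theorem ext_getD (x y : List Int) (hl : x.length = y.length)
    (h : ∀ q, q < x.length → x.getD q 0 = y.getD q 0) : x = y := by
  apply List.ext_getElem hl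
  intro i h1 h2
  have := h i h1
  rwa [List.getD_eq_getElem _ _ h1, List.getD_eq_getElem _ _ h2] at this

theorem getD_map_range (n q : Nat) (f : Nat → Int) (d : Int) :
    (((List.range n).map f).getD q d) = if q < n then f q else d := by
  rw [List.getD_eq_getElem?_getD]
  by_cases h : q < n
  · simp [h]
  · simp [List.getElem?_map]
    rw [List.getElem?_eq_none (by simpa using h)]
    simp [h]

theorem getD_append_l (x y : List Int) (q : Nat) (h : q < x.length) :
    (x ++ y).getD q 0 = x.getD q 0 := by
  rw [List.getD_eq_getElem?_getD, List.getD_eq_getElem?_getD, List.getElem?_append_left h]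

theorem getD_append_r (x y : List Int) (q : Nat) (h : x.length ≤ q) :
    (x ++ y).getD q 0 = y.getD (q - x.length) 0 := by
  rw [List.getD_eq_getElem?_getD, List.getD_eq_getElem?_getD, List.getElem?_append_right h]

-- ===== bitwise lemmas =====

theorem land_rec (a b : Nat) : a &&& b = 2 * (a / 2 &&& b / 2) + a % 2 * (b % 2) := by
  apply Nat.eq_of_testBit_eq
  intro i
  cases i with
  | zero =>
    simp only [Nat.testBit_zero, Nat.testBit_land]
    rcases Nat.mod_two_eq_zero_or_one a with h1 | h1 <;>
      rcases Nat.mod_two_eq_zero_or_one b with h2 | h2 <;>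
      simp [h1, h2] <;> omega
  | succ i =>
    have hd : (2 * (a / 2 &&& b / 2) + a % 2 * (b % 2)) / 2 = a / 2 &&& b / 2 := by
      have : a % 2 * (b % 2) ≤ 1 := by
        rcases Nat.mod_two_eq_zero_or_one a with h1 | h1 <;> simp [h1] <;> omega
      omega
    rw [Nat.testBit_land]
    simp only [Nat.testBit_succ]
    rw [hd, Nat.testBit_land]

theorem lor_rec (a b : Nat) : a ||| b = 2 * (a / 2 ||| b / 2) + (a % 2 ||| b % 2) := by
  apply Nat.eq_of_testBit_eq
  intro i
  have hle : a % 2 ||| b % 2 ≤ 1 := by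
    rcases Nat.mod_two_eq_zero_or_one a with h1 | h1 <;>
      rcases Nat.mod_two_eq_zero_or_one b with h2 | h2 <;> simp [h1, h2]
  cases i with
  | zero =>
    simp only [Nat.testBit_zero, Nat.testBit_lor]
    rcases Nat.mod_two_eq_zero_or_one a with h1 | h1 <;>
      rcases Nat.mod_two_eq_zero_or_one b with h2 | h2 <;>
      simp [h1, h2] <;> omega
  | succ i =>
    have hd : (2 * (a / 2 ||| b / 2) + (a % 2 ||| b % 2)) / 2 = a / 2 ||| b / 2 := by omega
    rw [Nat.testBit_lor]
    simp only [Nat.testBit_succ]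
    rw [hd, Nat.testBit_lor]

theorem and_one (k : Nat) : k &&& 1 = k % 2 := by
  rw [land_rec]; simp

theorem lor_disj1 (L : Nat) : ∀ x, x < 2 ^ L → x ||| 1 <<< L = x + 2 ^ L := by
  induction L with
  | zero => intro x hx; interval_cases x; decide
  | succ L ih =>
    intro x hx
    rw [lor_rec]
    have s1 : (1 : Nat) <<< (L + 1) = 2 ^ (L + 1) := by simp [Nat.shiftLeft_eq]
    have s2 : (1 : Nat) <<< L = 2 ^ L := by simp [Nat.shiftLeft_eq]
    have p : (2 : Nat) ^ (L + 1) = 2 * 2 ^ L := by rw [pow_succ]; ring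
    have hx2 : x / 2 < 2 ^ L := by omega
    have hi := ih (x / 2) hx2
    rw [s2] at hi
    rw [s1]
    have h4 : 2 ^ (L + 1) / 2 = 2 ^ L := by omega
    have h5 : 2 ^ (L + 1) % 2 = 0 := by omega
    rw [h4, h5, hi, Nat.or_zero]
    omega

theorem lor_disj (L c x : Nat) (hc : c ≤ 1) (hx : x < 2 ^ L) :
    x ||| c <<< L = x + c * 2 ^ L := by
  interval_cases c
  · simp
  · simpa using lor_disj1 L x hx

theorem pow2_land (k : Nat) : ((k + 1) &&& k = 0) ↔ (∃ m, k + 1 = 2 ^ m) := by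
  induction k using Nat.strong_induction_on with
  | _ k ih =>
    rcases Nat.even_or_odd k with he | ho
    · obtain ⟨a, ha⟩ := he
      subst ha
      constructor
      · intro h
        rw [land_rec] at h
        have h1 : (a + a + 1) / 2 = a := by omega
        have h2 : (a + a) / 2 = a := by omega
        have h3 : (a + a + 1) % 2 = 1 := by omega
        have h4 : (a + a) % 2 = 0 := by omega
        rw [h1, h2, h3, h4] at h
        simp at h
        have : a &&& a = a := Nat.and_self a
        exact ⟨0, by omega⟩
      · rintro ⟨m, hm⟩
        cases m with
        | zero =>
          have : a = 0 := by omega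
          subst this; decide
        | succ m =>
          exfalso
          have : 2 ^ (m + 1) % 2 = 0 := by
            simp [pow_succ, Nat.mul_mod_left]
          omega
    · obtain ⟨a, ha⟩ := ho
      subst ha
      have hrec : (2 * a + 1 + 1) &&& (2 * a + 1) = 2 * ((a + 1) &&& a) := by
        rw [land_rec]
        have h1 : (2 * a + 1 + 1) / 2 = a + 1 := by omega
        have h2 : (2 * a + 1) / 2 = a := by omega
        have h3 : (2 * a + 1 + 1) % 2 = 0 := by omega
        rw [h1, h2, h3]
        simp
      rw [hrec]
      have iha := ih a (by omega)
      constructor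
      · intro h
        have : (a + 1) &&& a = 0 := by omega
        obtain ⟨m, hm⟩ := iha.mp this
        exact ⟨m + 1, by rw [pow_succ]; omega⟩
      · rintro ⟨m, hm⟩
        cases m with
        | zero => omega
        | succ m =>
          have : a + 1 = 2 ^ m := by
            rw [pow_succ] at hm; omega
          have := iha.mpr ⟨m, this⟩
          omega

-- ===== bit_length lemmas =====

theorem bl_zero : bl 0 = 0 := by rw [bl]; norm_num

theorem bl_lt (n : Nat) : n < 2 ^ bl n := by
  induction n using Nat.strong_induction_on with
  | _ n ih =>
    rw [bl]
    by_cases h : n = 0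
    · simp [h]
    · simp only [h, if_false]
      have := ih (n / 2) (by omega)
      rw [pow_succ]
      omega

theorem bl_ge (n : Nat) (h : 1 ≤ n) : 2 ^ (bl n - 1) ≤ n := by
  induction n using Nat.strong_induction_on with
  | _ n ih =>
    rw [bl]
    simp only [Nat.pos_iff_ne_zero.mp h, if_false]
    by_cases h2 : n / 2 = 0
    · have : n = 1 := by omega
      subst this
      simp [bl_zero]
    · have hge := ih (n / 2) (by omega) (by omega)
      have hpos : 1 ≤ bl (n / 2) := by
        rw [bl]; simp [h2]
      have : bl (n / 2) + 1 - 1 = (bl (n / 2) - 1) + 1 := by omega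
      rw [this, pow_succ]
      omega

theorem bl_pos (n : Nat) (h : 1 ≤ n) : 1 ≤ bl n := by
  rw [bl]; simp [Nat.pos_iff_ne_zero.mp h]

theorem bl_eq_of (m n : Nat) (h1 : 2 ^ m ≤ n) (h2 : n < 2 ^ (m + 1)) : bl n = m + 1 := by
  have hn : 1 ≤ n := le_trans (Nat.one_le_two_pow) h1
  have hc1 := bl_lt n
  have hc2 := bl_ge n hn
  have hp := bl_pos n hn
  have ha : bl n - 1 < m + 1 := by
    by_contra hcon
    have : 2 ^ (m + 1) ≤ 2 ^ (bl n - 1) := Nat.pow_le_pow_right (by omega) (by omega)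
    omega
  have hb : m < bl n := by
    by_contra hcon
    have : 2 ^ bl n ≤ 2 ^ m := Nat.pow_le_pow_right (by omega) (by omega)
    omega
  omega

theorem bl_two_pow (m : Nat) : bl (2 ^ m) = m + 1 := by
  apply bl_eq_of m
  · exact le_refl _
  · rw [pow_succ]
    have := Nat.two_pow_pos m
    omega

theorem bl_step (k : Nat) (hk : 1 ≤ k) :
    (if (k + 1) &&& k = 0 then bl k + 1 else bl k) = bl (k + 1) := by
  by_cases h : (k + 1) &&& k = 0
  · obtain ⟨m, hm⟩ := (pow2_land k).mp h
    have hm1 : 1 ≤ m := by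
      cases m with
      | zero => simp at hm; omega
      | succ m => omega
    have hpow : 2 ^ (m - 1) * 2 = 2 ^ m := by
      rw [← pow_succ]; congr 1; omega
    have hblk : bl k = m := by
      have hp := Nat.two_pow_pos (m - 1)
      have h1 : 2 ^ (m - 1) ≤ k := by omega
      have h2 : k < 2 ^ (m - 1 + 1) := by rw [pow_succ]; omega
      have := bl_eq_of (m - 1) k h1 h2
      omega
    rw [if_pos h, hblk, hm, bl_two_pow]
  · rw [if_neg h]
    have hnp : ∀ m, k + 1 ≠ 2 ^ m := fun m hc => h ((pow2_land k).mpr ⟨m, hc⟩)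
    have h1 := bl_lt (k + 1)
    have h2 := bl_ge (k + 1) (by omega)
    have hp := bl_pos (k + 1) (by omega)
    have hne := hnp (bl (k + 1) - 1)
    have hs : bl (k + 1) - 1 + 1 = bl (k + 1) := by omega
    have ha : 2 ^ (bl (k + 1) - 1) ≤ k := by omega
    have hb : k < 2 ^ (bl (k + 1) - 1 + 1) := by rw [hs]; omega
    have := bl_eq_of _ _ ha hb
    omega

-- ===== bit-reversal lemmas =====

def br : Nat → Nat → Nat
  | 0, _ => 0
  | L + 1, i => i % 2 * 2 ^ L + br L (i / 2)

theorem br_lt (L i : Nat) : br L i < 2 ^ L := by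
  induction L generalizing i with
  | zero => simp [br]
  | succ L ih =>
    rw [br, pow_succ]
    have h1 := ih (i / 2)
    rcases Nat.mod_two_eq_zero_or_one i with h | h <;> rw [h] <;> simp <;> omega

theorem br_zero (L : Nat) : br L 0 = 0 := by
  induction L with
  | zero => rfl
  | succ L ih => rw [br]; simp [ih]

theorem br_div2 (L m : Nat) (h : 1 ≤ L) : br L m / 2 = br (L - 1) m := by
  induction L generalizing m with
  | zero => omega
  | succ L ih =>
    rw [br]
    simp only [Nat.add_sub_cancel]
    cases L with
    | zero =>
      simp [br, br_zero]
    | succ L' =>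
      have h2 : m % 2 * 2 ^ (L' + 1) = 2 * (m % 2 * 2 ^ L') := by rw [pow_succ]; ring
      calc (m % 2 * 2 ^ (L' + 1) + br (L' + 1) (m / 2)) / 2
          = m % 2 * 2 ^ L' + br (L' + 1) (m / 2) / 2 := by omega
        _ = m % 2 * 2 ^ L' + br L' (m / 2) := by
            rw [ih (m / 2) (by omega)]; simp
        _ = br (L' + 1) m := by rw [br]

theorem br_low (L i : Nat) (h : i < 2 ^ L) : br (L + 1) i = 2 * br L i := by
  induction L generalizing i with
  | zero =>
    have : i = 0 := by omega
    subst this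
    simp [br, br_zero]
  | succ L ih =>
    have h2 : i / 2 < 2 ^ L := by rw [pow_succ] at h; omega
    conv_lhs => rw [br]
    conv_rhs => rw [br]
    rw [ih (i / 2) h2]
    have p : (2 : Nat) ^ (L + 1) = 2 ^ L * 2 := pow_succ 2 L
    rw [p]; ring

theorem br_high (L i : Nat) (h : i < 2 ^ L) : br (L + 1) (2 ^ L + i) = 2 * br L i + 1 := by
  induction L generalizing i with
  | zero =>
    have : i = 0 := by omega
    subst this
    simp [br]
  | succ L ih =>
    have p : (2 : Nat) ^ (L + 1) = 2 ^ L * 2 := pow_succ 2 L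
    have h2 : i / 2 < 2 ^ L := by omega
    conv_lhs => rw [br]
    conv_rhs => rw [br]
    have hm : (2 ^ (L + 1) + i) % 2 = i % 2 := by omega
    have hd : (2 ^ (L + 1) + i) / 2 = 2 ^ L + i / 2 := by omega
    rw [hm, hd, ih (i / 2) h2, p]
    ring

theorem br_even (L m : Nat) : br (L + 1) (2 * m) = br L m := by
  rw [br]
  have h1 : 2 * m % 2 = 0 := by omega
  have h2 : 2 * m / 2 = m := by omega
  rw [h1, h2]; omega

theorem br_odd (L m : Nat) : br (L + 1) (2 * m + 1) = 2 ^ L + br L m := by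
  rw [br]
  have h1 : (2 * m + 1) % 2 = 1 := by omega
  have h2 : (2 * m + 1) / 2 = m := by omega
  rw [h1, h2]; omega

theorem br_invol (L i : Nat) (h : i < 2 ^ L) : br L (br L i) = i := by
  induction L generalizing i with
  | zero =>
    simp [br]; omega
  | succ L ih =>
    rcases Nat.even_or_odd i with he | ho
    · obtain ⟨m, hm⟩ := he
      have hm' : i = 2 * m := by omega
      subst hm'
      rw [br_even]
      have hmlt : m < 2 ^ L := by rw [pow_succ] at h; omega
      have : br L m < 2 ^ L := br_lt L m
      rw [br_low L _ this, ih m hmlt]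
    · obtain ⟨m, hm⟩ := ho
      subst hm
      rw [br_odd]
      have hmlt : m < 2 ^ L := by rw [pow_succ] at h; omega
      have : br L m < 2 ^ L := br_lt L m
      rw [br_high L _ this, ih m hmlt]


-- ===== modular power lemmas =====

theorem emod_mod_self (a : Int) : a % 998244353 ≡ a [ZMOD 998244353] :=
  Int.emod_emod_of_dvd a dvd_rfl

theorem modpowGo_spec (e : Nat) : ∀ (r b : Int), 0 ≤ r → r < 998244353 →
    modpowGo r b e 998244353 = r * b ^ e % 998244353 := by
  induction e using Nat.strong_induction_on with
  | _ e ih =>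
    intro r b hr0 hr1
    rw [modpowGo]
    by_cases he : e = 0
    · subst he
      simp [Int.emod_eq_of_lt hr0 hr1]
    · rw [if_neg he]
      by_cases hodd : e % 2 = 1
      · rw [if_pos hodd, ih (e / 2) (by omega) _ _
          (Int.emod_nonneg _ (by norm_num)) (Int.emod_lt_of_pos _ (by norm_num))]
        have hee : 2 * (e / 2) + 1 = e := by omega
        have h : (r * b % 998244353) * (b * b % 998244353) ^ (e / 2)
            ≡ r * b ^ e [ZMOD 998244353] := by
          calc (r * b % 998244353) * (b * b % 998244353) ^ (e / 2)
              ≡ (r * b) * (b * b) ^ (e / 2) [ZMOD 998244353] :=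
                ((emod_mod_self _).mul ((emod_mod_self _).pow _))
            _ = r * b ^ (2 * (e / 2) + 1) := by ring
            _ = r * b ^ e := by rw [hee]
        exact h
      · rw [if_neg hodd, ih (e / 2) (by omega) _ _ hr0 hr1]
        have hee : 2 * (e / 2) = e := by omega
        have h : r * (b * b % 998244353) ^ (e / 2)
            ≡ r * b ^ e [ZMOD 998244353] := by
          calc r * (b * b % 998244353) ^ (e / 2)
              ≡ r * (b * b) ^ (e / 2) [ZMOD 998244353] :=
                ((Int.ModEq.refl _).mul ((emod_mod_self _).pow _))
            _ = r * b ^ (2 * (e / 2)) := by ring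
            _ = r * b ^ e := by rw [hee]
        exact h

theorem modpow_spec (b : Int) (e : Nat) : modpow b e 998244353 = b ^ e % 998244353 := by
  rw [modpow, modpowGo_spec e _ _ (by norm_num) (by norm_num)]
  have h : (1 : Int) * (b % 998244353) ^ e ≡ b ^ e [ZMOD 998244353] := by
    calc (1 : Int) * (b % 998244353) ^ e
        ≡ 1 * b ^ e [ZMOD 998244353] := ((Int.ModEq.refl 1).mul ((emod_mod_self b).pow e))
      _ = b ^ e := by ring
  exact h

theorem powModGo_spec (e : Nat) : ∀ b : Int, powModGo b e = b ^ e % 998244353 := by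
  induction e using Nat.strong_induction_on with
  | _ e ih =>
    intro b
    rw [powModGo]
    by_cases he : e = 0
    · subst he; norm_num
    · rw [if_neg he]
      rw [ih (e / 2) (by omega)]
      by_cases hev : e % 2 = 0
      · rw [if_pos hev]
        have hee : 2 * (e / 2) = e := by omega
        have h : (b ^ (e / 2) % 998244353) * (b ^ (e / 2) % 998244353)
            ≡ b ^ e [ZMOD 998244353] := by
          calc (b ^ (e / 2) % 998244353) * (b ^ (e / 2) % 998244353)
              ≡ b ^ (e / 2) * b ^ (e / 2) [ZMOD 998244353] :=
                ((emod_mod_self _).mul (emod_mod_self _))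
            _ = b ^ (2 * (e / 2)) := by ring
            _ = b ^ e := by rw [hee]
        exact h
      · rw [if_neg hev]
        have hee : 2 * (e / 2) + 1 = e := by omega
        have h : (b ^ (e / 2) % 998244353) * (b ^ (e / 2) % 998244353) % 998244353 * b
            ≡ b ^ e [ZMOD 998244353] := by
          calc (b ^ (e / 2) % 998244353) * (b ^ (e / 2) % 998244353) % 998244353 * b
              ≡ b ^ (e / 2) * b ^ (e / 2) * b [ZMOD 998244353] :=
                ((emod_mod_self _).trans
                  ((emod_mod_self _).mul (emod_mod_self _))).mul (Int.ModEq.refl b)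
            _ = b ^ (2 * (e / 2) + 1) := by ring
            _ = b ^ e := by rw [hee]
        exact h

theorem powMod_spec (b : Int) (e : Nat) : powMod b e = b ^ e % 998244353 := by
  rw [powMod, powModGo_spec]
  exact (emod_mod_self b).pow e

theorem modpow_eq_powMod (b : Int) (e : Nat) : modpow b e 998244353 = powMod b e := by
  rw [modpow_spec, powMod_spec]

-- ===== the common root table =====

def rtSpec (k : Nat) : Int :=
  if k = 0 then 1
  else if k % 2 = 0 then rtSpec (k / 2)
  else rtSpec (k / 2) * ((62 : Int) ^ (998244353 >>> (bl k + 1)) % 998244353) % 998244353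
termination_by k
decreasing_by all_goals omega

theorem rtLoopA_spec (n : Nat) (d : Nat) : ∀ (k s : Nat) (rt : List Int), n - k = d → 1 ≤ k →
    s = bl k → rt.length = n → (∀ i, i < k → i < n → rt.getD i 0 = rtSpec i) →
    (rtLoopA rt k s n).length = n ∧ ∀ i, i < n → (rtLoopA rt k s n).getD i 0 = rtSpec i := by
  induction d with
  | zero =>
    intro k s rt hd hk hs hlen hinv
    rw [rtLoopA, if_neg (by omega)]
    exact ⟨hlen, fun i hi => hinv i (by omega) hi⟩
  | succ d ih =>
    intro k s rt hd hk hs hlen hinv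
    have hkn : k < n := by omega
    rw [rtLoopA, if_pos hkn]
    have hstep := bl_step k hk
    apply ih (k + 1) _ _ (by omega) (by omega) (by rw [← hstep, hs]) (by simp [hlen])
    intro i hik hin
    rw [getD_set]
    by_cases hik2 : i = k
    · subst hik2
      rw [if_pos ⟨rfl, by omega⟩]
      by_cases hpar : i % 2 = 0
      · rw [if_pos hpar]
        have h1 : i ≠ 1 := by omega
        rw [if_neg h1, if_pos hpar]
        rw [hinv (i / 2) (by omega) (by omega)]
        conv_rhs => rw [rtSpec]
        rw [if_neg (by omega), if_pos hpar]
      · rw [if_neg hpar]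
        rw [hinv (i / 2) (by omega) (by omega), modpow_spec, hs]
        conv_rhs => rw [rtSpec]
        rw [if_neg (by omega), if_neg hpar]
    · rw [if_neg (by intro hc; exact hik2 hc.1.symm)]
      exact hinv i (by omega) hin

theorem range'_concat (m : Nat) : List.range' 1 (m + 1) = List.range' 1 m ++ [1 + m] := by
  rw [List.range'_1_concat]

theorem rtTableB_inv (n : Nat) : ∀ m, m ≤ n - 1 →
    (((List.range' 1 m).foldl
      (fun rt k =>
        rt.set k
          (if k % 2 = 0 then rt.getD (k / 2) 0
           else rt.getD (k / 2) 0 * powMod 62 (998244353 >>> (bl k + 1)) % 998244353))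
      (List.replicate n (1 : Int))).length = n ∧
     ∀ i, i < n →
      ((List.range' 1 m).foldl
      (fun rt k =>
        rt.set k
          (if k % 2 = 0 then rt.getD (k / 2) 0
           else rt.getD (k / 2) 0 * powMod 62 (998244353 >>> (bl k + 1)) % 998244353))
      (List.replicate n (1 : Int))).getD i 0 = if i < 1 + m then rtSpec i else 1) := by
  intro m
  induction m with
  | zero =>
    intro _
    refine ⟨by simp, fun i hi => ?_⟩
    simp only [List.range'_zero, List.foldl_nil]
    rw [List.getD_eq_getElem?_getD, List.getElem?_replicate, if_pos hi]
    by_cases h0 : i < 1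
    · have : i = 0 := by omega
      subst this
      rw [if_pos (by omega), rtSpec]
      norm_num
    · rw [if_neg h0]
      rfl
  | succ m ih =>
    intro hm
    obtain ⟨ihl, ihv⟩ := ih (by omega)
    rw [range'_concat, List.foldl_append, List.foldl_cons, List.foldl_nil]
    constructor
    · rw [List.length_set]; exact ihl
    · intro i hi
      rw [getD_set]
      by_cases hik : 1 + m = i
      · subst hik
        rw [if_pos ⟨rfl, by omega⟩]
        by_cases hpar : (1 + m) % 2 = 0
        · rw [if_pos hpar, ihv _ (by omega), if_pos (by omega)]
          conv_rhs => rw [if_pos (by omega), rtSpec]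
          rw [if_neg (by omega), if_pos hpar]
        · rw [if_neg hpar, ihv _ (by omega), if_pos (by omega), powMod_spec]
          conv_rhs => rw [if_pos (by omega), rtSpec]
          rw [if_neg (by omega), if_neg hpar]
      · rw [if_neg (by intro hc; exact hik hc.1), ihv i hi]
        by_cases h2 : i < 1 + m
        · rw [if_pos h2, if_pos (by omega)]
        · rw [if_neg h2, if_neg (by omega)]

theorem rt_eq (n : Nat) (hn : 1 ≤ n) :
    rtLoopA ((List.replicate n (0 : Int)).set 0 1) 1 1 n = rtTableB n := by
  have bl_one : bl 1 = 1 := by rw [bl]; norm_num [bl_zero]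
  have hA := rtLoopA_spec n (n - 1) 1 1 ((List.replicate n (0 : Int)).set 0 1) (by omega)
    (by omega) bl_one.symm (by simp)
    (by
      intro i hi1 hin
      have : i = 0 := by omega
      subst this
      rw [getD_set, if_pos ⟨rfl, by simp; omega⟩, rtSpec]
      norm_num)
  have hB := rtTableB_inv n (n - 1) (le_refl _)
  rw [rtTableB]
  apply ext_getD
  · rw [hA.1, hB.1]
  · intro q hq
    rw [hA.1] at hq
    rw [hA.2 q hq, hB.2 q hq, if_pos (by omega)]

-- ===== bit-reversal permutation lemmas =====

def permBr (L n : Nat) (a : List Int) : List Int :=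
  (List.range n).map (fun i => a.getD (br L i) 0)

theorem revLoop_inv (L n : Nat) (hL : 1 ≤ L) : ∀ m, m ≤ n →
    ((List.range m).foldl (fun rev i => rev.set i ((rev.getD (i / 2) 0 ||| ((i &&& 1) <<< L)) / 2)) (List.replicate n 0)).length = n ∧
    ∀ i, i < n → ((List.range m).foldl (fun rev i => rev.set i ((rev.getD (i / 2) 0 ||| ((i &&& 1) <<< L)) / 2)) (List.replicate n 0)).getD i 0 = if i < m then br L i else 0 := by
  intro m
  induction m with
  | zero =>
    intro _
    refine ⟨by simp, fun i hi => ?_⟩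
    simp only [List.range_zero, List.foldl_nil]
    rw [List.getD_eq_getElem?_getD, List.getElem?_replicate, if_pos hi]
    simp
  | succ m ih =>
    intro hm
    obtain ⟨ihl, ihv⟩ := ih (by omega)
    rw [List.range_succ, List.foldl_append, List.foldl_cons, List.foldl_nil]
    refine ⟨by rw [List.length_set]; exact ihl, fun i hi => ?_⟩
    rw [getD_set_nat]
    by_cases him : m = i
    · subst him
      rw [if_pos ⟨rfl, by omega⟩, if_pos (by omega)]
      by_cases hm0 : m = 0
      · subst hm0
        rw [ihv 0 (by omega)]
        norm_num [br_zero]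
      · rw [ihv (m / 2) (by omega), if_pos (by omega), and_one]
        rw [lor_disj L (m % 2) (br L (m / 2)) (by omega) (br_lt L (m / 2))]
        have hdd := br_div2 L (m / 2) hL
        have h2 : (2 : Nat) ^ L = 2 * 2 ^ (L - 1) := by
          conv_lhs => rw [show L = L - 1 + 1 by omega]
          rw [pow_succ]; ring
        have target : br L m = m % 2 * 2 ^ (L - 1) + br (L - 1) (m / 2) := by
          conv_lhs => rw [show L = L - 1 + 1 by omega, br]
        rw [target]
        rcases Nat.mod_two_eq_zero_or_one m with hp | hp <;> rw [hp] <;> simp <;> omega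
    · rw [if_neg (by intro hc; exact him hc.1), ihv i hi]
      by_cases h2 : i < m
      · rw [if_pos h2, if_pos (by omega)]
      · rw [if_neg h2, if_neg (by omega)]

theorem revLoop_spec (L n : Nat) (hL : 1 ≤ L) :
    (revLoopA L n).length = n ∧ ∀ i, i < n → (revLoopA L n).getD i 0 = br L i := by
  obtain ⟨h1, h2⟩ := revLoop_inv L n hL n (le_refl n)
  refine ⟨h1, fun i hi => ?_⟩
  rw [revLoopA]
  rw [h2 i hi, if_pos hi]

theorem swapLoop_inv (L n : Nat) (hn : n = 2 ^ L) (R : List Nat)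
    (hR : ∀ i, i < n → R.getD i 0 = br L i) (a : List Int) (ha : a.length = n) :
    ∀ m, m ≤ n →
    ((List.range m).foldl (fun a i =>
      let r := R.getD i 0
      if i < r then
        let x := a.getD i 0
        let y := a.getD r 0
        (a.set i y).set r x
      else a) a).length = n ∧
    ∀ q, q < n → ((List.range m).foldl (fun a i =>
      let r := R.getD i 0
      if i < r then
        let x := a.getD i 0
        let y := a.getD r 0
        (a.set i y).set r x
      else a) a).getD q 0 = if q < m ∨ br L q < m then a.getD (br L q) 0 else a.getD q 0 := by
  intro m
  induction m with
  | zero =>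
    intro _
    refine ⟨ha, fun q hq => ?_⟩
    simp only [List.range_zero, List.foldl_nil]
    rw [if_neg (by omega)]
  | succ m ih =>
    intro hm
    obtain ⟨ihl, ihv⟩ := ih (by omega)
    rw [List.range_succ, List.foldl_append, List.foldl_cons, List.foldl_nil]
    have hrm : R.getD m 0 = br L m := hR m (by omega)
    have hbm : br L m < n := hn ▸ br_lt L m
    have hinvol : br L (br L m) = m := br_invol L m (by omega)
    simp only [hrm]
    by_cases hsw : m < br L m
    · rw [if_pos hsw]
      have hxm : ∀ q, q < n → br L q = m → q = br L m := by
        intro q hq hbq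
        rw [← hbq, br_invol L q (by omega)]
      refine ⟨by rw [List.length_set, List.length_set]; exact ihl, fun q hq => ?_⟩
      rw [getD_set, getD_set]
      rw [List.length_set, ihl]
      by_cases hqr : br L m = q
      · rw [if_pos ⟨hqr, by omega⟩]
        rw [ihv m (by omega), if_neg (by omega), ← hqr, hinvol]
        rw [if_pos (by omega)]
      · rw [if_neg (by intro hc; exact hqr hc.1)]
        by_cases hqm : m = q
        · rw [if_pos ⟨hqm, by omega⟩, ihv (br L m) (by omega)]
          rw [if_neg (by omega), ← hqm, if_pos (by omega)]
        · rw [if_neg (by intro hc; exact hqm hc.1), ihv q hq]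
          have hbq : br L q ≠ m := by
            intro hc
            exact hqr (hxm q hq hc).symm
          by_cases h2 : q < m ∨ br L q < m
          · rw [if_pos h2, if_pos (by omega)]
          · rw [if_neg h2, if_neg (by omega)]
    · rw [if_neg hsw]
      refine ⟨ihl, fun q hq => ?_⟩
      rw [ihv q hq]
      by_cases hqm : q = m
      · subst hqm
        by_cases hrq : br L q = q
        · rw [if_neg (by omega), if_pos (by omega), hrq]
        · have : br L q < q := by omega
          rw [if_pos (by omega), if_pos (by omega)]
      · have hbq : br L q = m → q = br L m := by
          intro hc
          rw [← hc, br_invol L q (by omega)]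
        by_cases h2 : q < m ∨ br L q < m
        · rw [if_pos h2, if_pos (by omega)]
        · have h3 : br L q ≠ m := by
            intro hc
            have := hbq hc
            omega
          rw [if_neg h2, if_neg (by omega)]

theorem swapLoop_spec (L n : Nat) (hn : n = 2 ^ L) (R : List Nat)
    (hR : ∀ i, i < n → R.getD i 0 = br L i) (a : List Int) (ha : a.length = n) :
    swapLoopA R a n = permBr L n a := by
  obtain ⟨h1, h2⟩ := swapLoop_inv L n hn R hR a ha n (le_refl n)
  have hlen : (swapLoopA R a n).length = n := by unfold swapLoopA; exact h1
  apply ext_getD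
  · rw [hlen, permBr, List.length_map, List.length_range]
  · intro q hq
    rw [hlen] at hq
    have hv : (swapLoopA R a n).getD q 0
        = if q < n ∨ br L q < n then a.getD (br L q) 0 else a.getD q 0 := by
      unfold swapLoopA; exact h2 q hq
    rw [hv, if_pos (by omega), permBr, getD_map_range, if_pos hq]

-- ===== butterfly stage lemmas =====

def blockVal (rt : List Int) (k : Nat) (c : List Int) (q : Nat) : Int :=
  if q % (2 * k) < k then
    (c.getD q 0 + rt.getD (q % (2 * k) + k) 0 * c.getD (q + k) 0 % 998244353) % 998244353
  else
    (c.getD (q - k) 0 - rt.getD (q % (2 * k)) 0 * c.getD q 0 % 998244353 + 998244353) % 998244353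

def stageF (rt : List Int) (k : Nat) (c : List Int) : List Int :=
  (List.range c.length).map (blockVal rt k c)

theorem stageF_length (rt : List Int) (k : Nat) (c : List Int) :
    (stageF rt k c).length = c.length := by simp [stageF]

def stepB (rt : List Int) (k i : Nat) : List Int → Nat → List Int := fun a j =>
  let z := rt.getD (j + k) 0 * a.getD (i + j + k) 0 % 998244353
  let a := a.set (i + j + k) ((a.getD (i + j) 0 - z + 998244353) % 998244353)
  a.set (i + j) ((a.getD (i + j) 0 + z) % 998244353)

theorem inner_spec (rt : List Int) (k : Nat) (hk : 0 < k) (i : Nat) (c : List Int)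
    (hik : i + 2 * k ≤ c.length) : ∀ m, m ≤ k →
    ((List.range m).foldl (stepB rt k i) c).length = c.length ∧
    ∀ q, ((List.range m).foldl (stepB rt k i) c).getD q 0 =
      if i ≤ q ∧ q < i + m then
        (c.getD q 0 + rt.getD (q - i + k) 0 * c.getD (q + k) 0 % 998244353) % 998244353
      else if i + k ≤ q ∧ q < i + k + m then
        (c.getD (q - k) 0 - rt.getD (q - i) 0 * c.getD q 0 % 998244353 + 998244353) % 998244353
      else c.getD q 0 := by
  intro m
  induction m with
  | zero =>
    refine fun _ => ⟨by simp, fun q => ?_⟩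
    simp only [List.range_zero, List.foldl_nil]
    rw [if_neg (by omega), if_neg (by omega)]
  | succ m ih =>
    intro hm
    obtain ⟨ihl, ihv⟩ := ih (by omega)
    rw [List.range_succ, List.foldl_append, List.foldl_cons, List.foldl_nil]
    set P := (List.range m).foldl (stepB rt k i) c with hP
    have hA : P.getD (i + m + k) 0 = c.getD (i + m + k) 0 := by
      rw [ihv, if_neg (by omega), if_neg (by omega)]
    have hB : P.getD (i + m) 0 = c.getD (i + m) 0 := by
      rw [ihv, if_neg (by omega), if_neg (by omega)]
    simp only [stepB]
    rw [getD_set, if_neg (by omega)]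
    rw [hA, hB]
    constructor
    · rw [List.length_set, List.length_set]
      exact ihl
    · intro q
      rw [getD_set, getD_set, List.length_set, ihl]
      by_cases hq1 : i + m = q
      · rw [if_pos ⟨hq1, by omega⟩]
        subst hq1
        rw [if_pos (by omega)]
        have h1 : i + m - i = m := by omega
        rw [h1]
      · rw [if_neg (by intro hc; exact hq1 hc.1)]
        by_cases hq2 : i + m + k = q
        · rw [if_pos ⟨hq2, by omega⟩]
          subst hq2
          rw [if_neg (by omega), if_pos (by omega)]
          have h1 : i + m + k - i = m + k := by omega
          have h2 : i + m + k - k = i + m := by omega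
          rw [h1, h2]
        · rw [if_neg (by intro hc; exact hq2 hc.1), ihv q]
          by_cases hc1 : i ≤ q ∧ q < i + m
          · rw [if_pos hc1, if_pos (by omega)]
          · rw [if_neg hc1]
            by_cases hc2 : i + k ≤ q ∧ q < i + k + m
            · rw [if_pos hc2, if_neg (by omega), if_pos (by omega)]
            · rw [if_neg hc2, if_neg (by omega), if_neg (by omega)]

theorem stage_fold_inv (rt : List Int) (k : Nat) (hk : 0 < k) (c : List Int) (B : Nat)
    (hB : c.length = 2 * k * B) : ∀ m, m ≤ B →
    ((List.range m).foldl (fun a i => (List.range k).foldl (stepB rt k (i * (2 * k))) a) c).length = c.length ∧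
    ∀ q, ((List.range m).foldl (fun a i => (List.range k).foldl (stepB rt k (i * (2 * k))) a) c).getD q 0 =
      if q < m * (2 * k) then blockVal rt k c q else c.getD q 0 := by
  intro m
  induction m with
  | zero =>
    refine fun _ => ⟨rfl, fun q => ?_⟩
    simp only [List.range_zero, List.foldl_nil]
    rw [if_neg (by omega)]
  | succ m ih =>
    intro hm
    obtain ⟨ihl, ihv⟩ := ih (by omega)
    rw [List.range_succ, List.foldl_append, List.foldl_cons, List.foldl_nil]
    set P := (List.range m).foldl (fun a i => (List.range k).foldl (stepB rt k (i * (2 * k))) a) c with hP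
    have hx1 : (m + 1) * (2 * k) = m * (2 * k) + 2 * k := by ring
    have hik : m * (2 * k) + 2 * k ≤ P.length := by
      rw [ihl]
      have : (m + 1) * (2 * k) ≤ B * (2 * k) := Nat.mul_le_mul_right _ (by omega)
      have h2 : 2 * k * B = B * (2 * k) := by ring
      omega
    obtain ⟨jl, jv⟩ := inner_spec rt k hk (m * (2 * k)) P hik k (le_refl k)
    constructor
    · rw [jl]; exact ihl
    · intro q
      rw [jv q]
      have hPblk : ∀ t, m * (2 * k) ≤ t → P.getD t 0 = c.getD t 0 := by
        intro t ht
        rw [ihv t, if_neg (by omega)]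
      by_cases h1 : m * (2 * k) ≤ q ∧ q < m * (2 * k) + k
      · rw [if_pos h1]
        have hmod : q % (2 * k) = q - m * (2 * k) := by
          have he : q = (q - m * (2 * k)) + m * (2 * k) := by omega
          conv_lhs => rw [he]
          rw [Nat.add_mul_mod_self_right]
          exact Nat.mod_eq_of_lt (by omega)
        rw [if_pos (by omega), blockVal, hmod, if_pos (by omega)]
        rw [hPblk q (by omega), hPblk (q + k) (by omega)]
      · rw [if_neg h1]
        by_cases h2 : m * (2 * k) + k ≤ q ∧ q < m * (2 * k) + k + k
        · rw [if_pos h2]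
          have hmod : q % (2 * k) = q - m * (2 * k) := by
            have he : q = (q - m * (2 * k)) + m * (2 * k) := by omega
            conv_lhs => rw [he]
            rw [Nat.add_mul_mod_self_right]
            exact Nat.mod_eq_of_lt (by omega)
          rw [if_pos (by omega), blockVal, hmod, if_neg (by omega)]
          rw [hPblk (q - k) (by omega), hPblk q (by omega)]
        · rw [if_neg h2, ihv q]
          by_cases h3 : q < m * (2 * k)
          · rw [if_pos h3, if_pos (by omega)]
          · rw [if_neg h3, if_neg (by omega)]

theorem stage_fold_spec (rt : List Int) (k : Nat) (hk : 0 < k) (c : List Int)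
    (hdvd : 2 * k ∣ c.length) :
    (rangeStep c.length (2 * k)).foldl (fun a i => (List.range k).foldl (stepB rt k i) a) c
      = stageF rt k c := by
  obtain ⟨B, hB⟩ := hdvd
  have hBd : c.length / (2 * k) = B := by
    rw [hB]
    exact Nat.mul_div_cancel_left B (by omega)
  rw [rangeStep, hBd, List.foldl_map]
  obtain ⟨hl, hv⟩ := stage_fold_inv rt k hk c B hB B (le_refl B)
  apply ext_getD
  · rw [hl, stageF_length]
  · intro q hq
    rw [hl] at hq
    have hcc : 2 * k * B = B * (2 * k) := Nat.mul_comm (2 * k) B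
    rw [hv q, if_pos (by rw [hB] at hq; omega), stageF, getD_map_range, if_pos hq]

theorem stageF_append (rt : List Int) (k : Nat) (hk : 0 < k) (x y : List Int)
    (hx : 2 * k ∣ x.length) :
    stageF rt k (x ++ y) = stageF rt k x ++ stageF rt k y := by
  obtain ⟨B, hB⟩ := hx
  rw [stageF, stageF, stageF, List.length_append, List.range_add, List.map_append, List.map_map]
  congr 1
  · apply List.map_congr_left
    intro q hq
    rw [List.mem_range] at hq
    have hmlt : q % (2 * k) < 2 * k := Nat.mod_lt q (by omega)
    have hmod := Nat.div_add_mod q (2 * k)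
    have e2 : 2 * k * (q / (2 * k)) = q / (2 * k) * (2 * k) := by ring
    have e3 : B * (2 * k) = 2 * k * B := by ring
    have hdB : q / (2 * k) < B := by
      by_contra hcon
      have : B * (2 * k) ≤ q / (2 * k) * (2 * k) := Nat.mul_le_mul_right _ (by omega)
      omega
    have hblk : (q / (2 * k) + 1) * (2 * k) ≤ B * (2 * k) := Nat.mul_le_mul_right _ (by omega)
    have e1 : (q / (2 * k) + 1) * (2 * k) = q / (2 * k) * (2 * k) + 2 * k := by ring
    rw [blockVal, blockVal]
    by_cases hbr : q % (2 * k) < k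
    · rw [if_pos hbr, if_pos hbr]
      rw [getD_append_l _ _ _ (by omega), getD_append_l _ _ _ (by omega)]
    · rw [if_neg hbr, if_neg hbr]
      rw [getD_append_l _ _ _ (by omega), getD_append_l _ _ _ (by omega)]
  · apply List.map_congr_left
    intro j hj
    rw [List.mem_range] at hj
    simp only [Function.comp]
    have hmod : (x.length + j) % (2 * k) = j % (2 * k) := by
      rw [hB, Nat.mul_add_mod]
    have hjm : j % (2 * k) ≤ j := Nat.mod_le j _
    rw [blockVal, blockVal, hmod]
    by_cases hbr : j % (2 * k) < k
    · rw [if_pos hbr, if_pos hbr]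
      rw [getD_append_r _ _ _ (by omega), getD_append_r _ _ _ (by omega)]
      have e1 : x.length + j - x.length = j := by omega
      have e2 : x.length + j + k - x.length = j + k := by omega
      rw [e1, e2]
    · rw [if_neg hbr, if_neg hbr]
      have hjk : k ≤ j % (2 * k) := by omega
      rw [getD_append_r _ _ _ (by omega), getD_append_r _ _ _ (by omega)]
      have e1 : x.length + j - k - x.length = j - k := by omega
      have e2 : x.length + j - x.length = j := by omega
      rw [e1, e2]

theorem butterfly_stop (rt a : List Int) (k n : Nat) (h : ¬(0 < k ∧ k < n)) :
    butterflyA rt a k n = a := by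
  rw [butterflyA, if_neg h]

theorem butterfly_step (rt a : List Int) (k n : Nat) (hk : 0 < k) (hkn : k < n)
    (hlen : a.length = n) (hdvd : 2 * k ∣ n) :
    butterflyA rt a k n = butterflyA rt (stageF rt k a) (2 * k) n := by
  subst hlen
  rw [butterflyA, if_pos ⟨hk, hkn⟩]
  show butterflyA rt
      ((rangeStep a.length (2 * k)).foldl (fun a i => (List.range k).foldl (stepB rt k i) a) a)
      (2 * k) a.length = _
  rw [stage_fold_spec rt k hk a hdvd]

theorem two_pow_succ (L : Nat) : 2 * 2 ^ L = 2 ^ (L + 1) := by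
  rw [pow_succ]; ring

theorem butterfly_split (rt : List Int) (L : Nat) : ∀ d t, t + d = L → ∀ x y : List Int,
    x.length = 2 ^ L → y.length = 2 ^ L →
    butterflyA rt (x ++ y) (2 ^ t) (2 ^ (L + 1)) =
      stageF rt (2 ^ L) (butterflyA rt x (2 ^ t) (2 ^ L) ++ butterflyA rt y (2 ^ t) (2 ^ L)) := by
  intro d
  induction d with
  | zero =>
    intro t ht x y hx hy
    have htL : t = L := by omega
    subst htL
    have hp := Nat.two_pow_pos t
    have hps := two_pow_succ t
    rw [butterfly_stop rt x _ _ (by intro hcon; exact absurd hcon.2 (lt_irrefl _)),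
        butterfly_stop rt y _ _ (by intro hcon; exact absurd hcon.2 (lt_irrefl _))]
    rw [butterfly_step rt (x ++ y) (2 ^ t) (2 ^ (t + 1)) hp (by omega)
        (by rw [List.length_append, hx, hy]; omega) ⟨1, by omega⟩]
    rw [butterfly_stop rt _ _ _ (by intro hcon; omega)]
  | succ d ih =>
    intro t ht x y hx hy
    have hp := Nat.two_pow_pos t
    have hps := two_pow_succ t
    have hpL := Nat.two_pow_pos L
    have hpsL := two_pow_succ L
    have htL : t < L := by omega
    have hlt : 2 ^ t < 2 ^ L := Nat.pow_lt_pow_right (by norm_num) htL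
    have hdvdL : 2 ^ (t + 1) ∣ 2 ^ L := pow_dvd_pow 2 (by omega)
    have hdvdL1 : 2 ^ (t + 1) ∣ 2 ^ (L + 1) := pow_dvd_pow 2 (by omega)
    rw [butterfly_step rt (x ++ y) (2 ^ t) (2 ^ (L + 1)) hp (by omega)
        (by rw [List.length_append, hx, hy]; omega) (by rw [hps]; exact hdvdL1)]
    rw [stageF_append rt (2 ^ t) hp x y (by rw [hx, hps]; exact hdvdL)]
    rw [hps]
    rw [ih (t + 1) (by omega) (stageF rt (2 ^ t) x) (stageF rt (2 ^ t) y)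
        (by rw [stageF_length, hx]) (by rw [stageF_length, hy])]
    rw [butterfly_step rt x (2 ^ t) (2 ^ L) hp hlt hx (by rw [hps]; exact hdvdL)]
    rw [butterfly_step rt y (2 ^ t) (2 ^ L) hp hlt hy (by rw [hps]; exact hdvdL)]
    rw [hps]

-- ===== even/odd split lemmas =====

theorem evensB_getD (w : List Int) : ∀ m, (evensB w).getD m 0 = w.getD (2 * m) 0 := by
  induction w using evensB.induct with
  | case1 => intro m; rfl
  | case2 x =>
    intro m
    cases m with
    | zero => rfl
    | succ m =>
      simp [evensB, List.getD_eq_getElem?_getD]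
  | case3 x y r ih =>
    intro m
    cases m with
    | zero => rfl
    | succ m =>
      show (x :: evensB r).getD (m + 1) 0 = _
      rw [List.getD_cons_succ, ih m]
      have : 2 * (m + 1) = (2 * m) + 1 + 1 := by omega
      rw [this, List.getD_cons_succ, List.getD_cons_succ]

theorem drop_one_getD (w : List Int) (q : Nat) : (w.drop 1).getD q 0 = w.getD (q + 1) 0 := by
  cases w with
  | nil => rfl
  | cons x t => rw [List.drop_one, List.tail_cons, List.getD_cons_succ]

theorem oddsB_getD (w : List Int) (m : Nat) : (oddsB w).getD m 0 = w.getD (2 * m + 1) 0 := by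
  rw [oddsB, evensB_getD, drop_one_getD]

theorem nttRecB_length (rt : List Int) (M : Nat) (v : List Int) (hv : v.length = 2 ^ M) :
    (nttRecB rt v).length = 2 ^ M := by
  rw [nttRecB]
  by_cases h : v.length ≤ 1
  · rw [if_pos h]; exact hv
  · rw [if_neg h]
    simp only [List.length_append, List.length_map, List.length_range]
    have hM : 1 ≤ M := by
      by_contra hc
      have : M = 0 := by omega
      subst this
      simp at hv
      omega
    have : 2 ^ M = 2 * 2 ^ (M - 1) := by
      rw [two_pow_succ]
      congr 1
      omega
    omega

theorem permBr_split (L : Nat) (v : List Int) (hv : v.length = 2 ^ (L + 1)) :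
    permBr (L + 1) (2 ^ (L + 1)) v =
      permBr L (2 ^ L) (evensB v) ++ permBr L (2 ^ L) (oddsB v) := by
  rw [permBr, permBr, permBr]
  have hsplit : 2 ^ (L + 1) = 2 ^ L + 2 ^ L := by
    have := two_pow_succ L
    omega
  rw [hsplit, List.range_add, List.map_append, List.map_map]
  congr 1
  · apply List.map_congr_left
    intro i hi
    rw [List.mem_range] at hi
    rw [br_low L i hi, evensB_getD]
  · apply List.map_congr_left
    intro i hi
    rw [List.mem_range] at hi
    simp only [Function.comp]
    rw [br_high L i hi, oddsB_getD]

theorem nttRecB_combine (rt v : List Int) (h2 : ¬ v.length ≤ 1) :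
    nttRecB rt v =
      ((List.range (v.length / 2)).map fun j =>
        ((nttRecB rt (evensB v)).getD j 0
         + ((List.range (v.length / 2)).map
             (fun j => rt.getD (v.length / 2 + j) 0 * (nttRecB rt (oddsB v)).getD j 0 % 998244353)).getD j 0)
          % 998244353) ++
      ((List.range (v.length / 2)).map fun j =>
        ((nttRecB rt (evensB v)).getD j 0
         - ((List.range (v.length / 2)).map
             (fun j => rt.getD (v.length / 2 + j) 0 * (nttRecB rt (oddsB v)).getD j 0 % 998244353)).getD j 0
         + 998244353) % 998244353) := by
  rw [nttRecB, if_neg h2]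

theorem main_ntt (rt : List Int) : ∀ L (v : List Int), v.length = 2 ^ L →
    butterflyA rt (permBr L (2 ^ L) v) 1 (2 ^ L) = nttRecB rt v := by
  intro L
  induction L with
  | zero =>
    intro v hv
    rw [butterfly_stop rt _ _ _ (by intro hcon; exact absurd hcon.2 (lt_irrefl _))]
    rw [nttRecB, if_pos (by omega)]
    match v, (by simpa using hv : v.length = 1) with
    | [x], _ =>
      rw [permBr]
      simp [br_zero]
  | succ L ih =>
    intro v hv
    have hpL := Nat.two_pow_pos L
    have hpsL := two_pow_succ L
    have hev : (evensB v).length = 2 ^ L := by rw [evensB_length, hv]; omega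
    have hod : (oddsB v).length = 2 ^ L := by rw [oddsB_length, hv]; omega
    rw [permBr_split L v hv]
    have hsp := butterfly_split rt L L 0 (by omega)
      (permBr L (2 ^ L) (evensB v)) (permBr L (2 ^ L) (oddsB v))
      (by simp [permBr]) (by simp [permBr])
    rw [pow_zero] at hsp
    rw [hsp, ih (evensB v) hev, ih (oddsB v) hod]
    rw [nttRecB_combine rt v (by omega), hv]
    have hvh : 2 ^ (L + 1) / 2 = 2 ^ L := by omega
    rw [hvh]
    have hel : (nttRecB rt (evensB v)).length = 2 ^ L := nttRecB_length rt L _ hev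
    have hol : (nttRecB rt (oddsB v)).length = 2 ^ L := nttRecB_length rt L _ hod
    apply ext_getD
    · rw [stageF_length, List.length_append, hel, hol]
      simp
    · intro q hq
      rw [stageF_length, List.length_append, hel, hol] at hq
      rw [stageF, getD_map_range, if_pos (by rw [List.length_append, hel, hol]; omega)]
      rw [blockVal, hpsL]
      have hqm : q % 2 ^ (L + 1) = q := Nat.mod_eq_of_lt (by omega)
      rw [hqm]
      by_cases hqL : q < 2 ^ L
      · rw [if_pos hqL]
        have hL1 : (nttRecB rt (evensB v) ++ nttRecB rt (oddsB v)).getD q 0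
            = (nttRecB rt (evensB v)).getD q 0 := getD_append_l _ _ _ (by omega)
        have hL2 : (nttRecB rt (evensB v) ++ nttRecB rt (oddsB v)).getD (q + 2 ^ L) 0
            = (nttRecB rt (oddsB v)).getD q 0 := by
          rw [getD_append_r _ _ _ (by omega), hel]
          congr 1
          omega
        rw [hL1, hL2]
        rw [getD_append_l _ _ _ (by simp only [List.length_map, List.length_range]; exact hqL)]
        rw [getD_map_range, if_pos hqL, getD_map_range, if_pos hqL]
        have e2 : 2 ^ L + q = q + 2 ^ L := by omega
        rw [e2]
      · rw [if_neg hqL]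
        have hL1 : (nttRecB rt (evensB v) ++ nttRecB rt (oddsB v)).getD (q - 2 ^ L) 0
            = (nttRecB rt (evensB v)).getD (q - 2 ^ L) 0 := getD_append_l _ _ _ (by omega)
        have hL2 : (nttRecB rt (evensB v) ++ nttRecB rt (oddsB v)).getD q 0
            = (nttRecB rt (oddsB v)).getD (q - 2 ^ L) 0 := by
          rw [getD_append_r _ _ _ (by omega), hel]
        rw [hL1, hL2]
        rw [getD_append_r _ _ _ (by simp only [List.length_map, List.length_range]; omega)]
        rw [List.length_map, List.length_range]
        rw [getD_map_range, if_pos (by omega), getD_map_range, if_pos (by omega)]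
        have e2 : 2 ^ L + (q - 2 ^ L) = q := by omega
        rw [e2]

-- ===== the two calls of ntt, as the recursive transform =====

theorem nttA_forward (v : List Int) (L : Nat) (hL : 1 ≤ L) (hv : v.length = 2 ^ L) :
    nttA v false = nttRecB (rtTableB (2 ^ L)) v := by
  have hp := Nat.two_pow_pos L
  have h2 : 2 ≤ 2 ^ L := by
    have := Nat.pow_le_pow_right (by norm_num : 1 ≤ 2) hL
    simpa using this
  have hn2 : ¬ v.length ≤ 1 := by omega
  simp only [nttA, if_neg hn2, Bool.false_eq_true, if_false]
  rw [hv, bl_two_pow, Nat.add_sub_cancel, rt_eq _ (by omega)]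
  obtain ⟨hRl, hRv⟩ := revLoop_spec L (2 ^ L) hL
  rw [swapLoop_spec L (2 ^ L) rfl (revLoopA L (2 ^ L)) hRv v hv]
  exact main_ntt _ L v hv

theorem nttA_inverse (v : List Int) (L : Nat) (hL : 1 ≤ L) (hv : v.length = 2 ^ L) :
    nttA v true =
      (((nttRecB (rtTableB (2 ^ L)) v).map
          (fun x => x * modpow ((2 ^ L : Nat) : Int) (998244353 - 2) 998244353 % 998244353)).reverse.set 0
        (((nttRecB (rtTableB (2 ^ L)) v).map
          (fun x => x * modpow ((2 ^ L : Nat) : Int) (998244353 - 2) 998244353 % 998244353)).reverse.getD (2 ^ L - 1) 0)).set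
        (2 ^ L - 1)
        (((nttRecB (rtTableB (2 ^ L)) v).map
          (fun x => x * modpow ((2 ^ L : Nat) : Int) (998244353 - 2) 998244353 % 998244353)).reverse.getD 0 0) := by
  have hp := Nat.two_pow_pos L
  have h2 : 2 ≤ 2 ^ L := by
    have := Nat.pow_le_pow_right (by norm_num : 1 ≤ 2) hL
    simpa using this
  have hn2 : ¬ v.length ≤ 1 := by omega
  simp only [nttA, if_neg hn2, if_true]
  rw [hv, bl_two_pow, Nat.add_sub_cancel, rt_eq _ (by omega)]
  obtain ⟨hRl, hRv⟩ := revLoop_spec L (2 ^ L) hL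
  rw [swapLoop_spec L (2 ^ L) rfl (revLoopA L (2 ^ L)) hRv v hv]
  rw [main_ntt _ L v hv]

theorem set_append_last (l : List Int) (a b : Int) : (l ++ [a]).set l.length b = l ++ [b] := by
  induction l with
  | nil => rfl
  | cons x t ih => simp [List.set_cons_succ, ih]

theorem tail_eq (w : List Int) (n : Nat) (hw : w.length = n) (hn : 2 ≤ n) :
    (w.reverse.set 0 (w.reverse.getD (n - 1) 0)).set (n - 1) (w.reverse.getD 0 0)
      = [w.getD 0 0] ++ ((w.drop 1).dropLast).reverse ++ [w.getD (n - 1) 0] := by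
  cases w with
  | nil => simp at hw; omega
  | cons hd tl =>
    have htl : tl ≠ [] := by
      intro h
      subst h
      simp at hw
      omega
    obtain ⟨mid, lst, hml⟩ : ∃ mid lst, tl = mid ++ [lst] :=
      ⟨tl.dropLast, tl.getLast htl, (List.dropLast_append_getLast htl).symm⟩
    subst hml
    have hmn : n = mid.length + 2 := by
      simp at hw
      omega
    have hrev : (hd :: (mid ++ [lst])).reverse = lst :: (mid.reverse ++ [hd]) := by
      simp
    rw [hrev]
    have hg0 : (lst :: (mid.reverse ++ [hd])).getD 0 0 = lst := rfl
    have hgn : (lst :: (mid.reverse ++ [hd])).getD (n - 1) 0 = hd := by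
      rw [show n - 1 = mid.length + 1 by omega, List.getD_cons_succ]
      rw [show mid.length = mid.reverse.length by simp]
      rw [List.getD_eq_getElem?_getD, List.getElem?_append_right (le_refl _)]
      simp
    rw [hg0, hgn]
    have hset0 : (lst :: (mid.reverse ++ [hd])).set 0 hd = hd :: (mid.reverse ++ [hd]) := rfl
    rw [hset0]
    have hd0 : (hd :: (mid ++ [lst])).getD 0 0 = hd := rfl
    have hdn : (hd :: (mid ++ [lst])).getD (n - 1) 0 = lst := by
      rw [show n - 1 = mid.length + 1 by omega, List.getD_cons_succ]
      rw [List.getD_eq_getElem?_getD, List.getElem?_append_right (le_refl _)]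
      simp
    rw [hd0, hdn]
    have hdrop : ((hd :: (mid ++ [lst])).drop 1).dropLast = mid := by
      simp
    rw [hdrop]
    rw [show n - 1 = mid.reverse.length + 1 by simp; omega, List.set_cons_succ,
      set_append_last]
    simp

-- ===== the glue: conv = conv_alt =====

theorem nttA_single (x : Int) (inv : Bool) : nttA [x] inv = [x] := by
  simp only [nttA, List.length_cons, List.length_nil, if_pos (by omega : 0 + 1 ≤ 1)]

theorem nttRecB_single (rt : List Int) (x : Int) : nttRecB rt [x] = [x] := by
  rw [nttRecB, if_pos (by simp)]

theorem nttA_short (v : List Int) (inv : Bool) (h : v.length ≤ 1) : nttA v inv = v := by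
  simp only [nttA, if_pos h]

theorem nttRecB_short (rt v : List Int) (h : v.length ≤ 1) : nttRecB rt v = v := by
  rw [nttRecB, if_pos h]

theorem conv_eq (a b : List Int) : conv a b = conv_alt a b := by
  by_cases hE : (a.isEmpty || b.isEmpty) = true
  · simp only [conv, conv_alt, if_pos hE]
  · simp only [conv, conv_alt, if_neg hE]
    have hae : a ≠ [] := by intro h; subst h; simp at hE
    have hbe : b ≠ [] := by intro h; subst h; simp at hE
    have ha1 : 1 ≤ a.length := List.length_pos_of_ne_nil hae
    have hb1 : 1 ≤ b.length := List.length_pos_of_ne_nil hbe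
    by_cases hs : a.length + b.length - 1 = 1
    · -- both singletons, transform size 1: every transform is the identity
      have ha' : a.length = 1 := by omega
      have hb' : b.length = 1 := by omega
      rw [hs]
      norm_num [bl_zero]
      rw [ha', hb']
      norm_num
      rw [nttA_short a false (by omega), nttA_short b false (by omega),
        nttRecB_short _ a (by omega), nttRecB_short _ b (by omega)]
      rw [nttA_single, nttRecB_single]
    · -- transform size at least 2
      generalize hLg : bl (a.length + b.length - 1 - 1) = L
      have hL1 : 1 ≤ L := by
        rw [← hLg]
        exact bl_pos _ (by omega)
      have hsle : a.length + b.length - 1 ≤ 2 ^ L := by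
        have h := bl_lt (a.length + b.length - 1 - 1)
        rw [hLg] at h
        omega
      have h2L : 2 ≤ 2 ^ L := by
        have := Nat.pow_le_pow_right (by norm_num : 1 ≤ 2) hL1
        simpa using this
      rw [Nat.one_shiftLeft]
      have hla : (a ++ List.replicate (2 ^ L - a.length) (0 : Int)).length = 2 ^ L := by
        simp
        omega
      have hlb : (b ++ List.replicate (2 ^ L - b.length) (0 : Int)).length = 2 ^ L := by
        simp
        omega
      rw [nttA_forward _ L hL1 hla, nttA_forward _ L hL1 hlb]
      have hout : ((List.range (2 ^ L)).map fun i =>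
          (nttRecB (rtTableB (2 ^ L)) (a ++ List.replicate (2 ^ L - a.length) (0 : Int))).getD i 0 *
          (nttRecB (rtTableB (2 ^ L)) (b ++ List.replicate (2 ^ L - b.length) (0 : Int))).getD i 0
            % 998244353).length = 2 ^ L := by
        simp
      rw [nttA_inverse _ L hL1 hout]
      rw [tail_eq _ (2 ^ L) (by rw [List.length_map]; exact nttRecB_length _ L _ hout) (by omega)]
      rw [if_pos (by omega : 1 < 2 ^ L)]
      rw [modpow_eq_powMod]

-- ===== VERDICT (by name: the statement is the Claim_ definition above) =====
theorem conv_spec : Claim_equal_conv := by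
  intro a b _
  show conv a b = conv_alt a b
  exact conv_eq a b
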